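-- pv_equiv track=rewrite | github.com/azhar-ikhtiarudin/shot-efficient-adapt-vqe | algorithms/adapt_vqe.py | convert_bitstrings_to_arrays
-- ===== SOURCE A (Python) =====
-- def convert_bitstrings_to_arrays(bitstrings, N):
--     all_possible_outcomes = [''.join(format(i, '0' + str(N) + 'b')) for i in range(2**N)]
--     outcome_to_index = {outcome: idx for idx, outcome in enumerate(all_possible_outcomes)}
--     # Convert each bitstring to a result array
--     results = []
--     for bitstring in bitstrings:
--         result_array = [0] * (2**N)
--         if bitstring in outcome_to_index:
--             result_array[outcome_to_index[bitstring]] = 1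
--         results.append(result_array)
--
--     return results
-- ===== SOURCE B (Python) =====
-- def convert_bitstrings_to_arrays(bitstrings, N):
--     # One-hot row per bitstring: the index IS the binary value, so parse it
--     # directly instead of materializing all 2**N outcome strings and a dict.
--     size = 2 ** N
--
--     def one_hot(bs):
--         row = [0] * size
--         if len(bs) == N and all(c in '01' for c in bs):
--             # leading '0' keeps the parse defined for the N == 0 empty outcome
--             row[int('0' + bs, 2)] = 1
--         return row
--
--     return [one_hot(bs) for bs in bitstrings]
-- ===== Notes on version B (the rewrite author's own statement) =====
-- stated objective: alternative
-- what changed: B computes each one-hot index directly by validating the bitstring (length N, chars in {0,1}) and parsing it as a base-2 integer, instead of materializing all 2^N outcome strings and a string-to-index dict before scanning the inputs.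
-- intended difference: When N = 0, A's format-built outcome table contains the spurious one-char string '0' instead of the true length-0 outcome '', so A one-hots '0' and zeroes ''; B one-hots '' and zeroes '0', which is the intended indexing of the single outcome of zero bits. — e.g. on convert_bitstrings_to_arrays(["0", ""], 0): A returns [[1], [0]], B returns [[0], [1]]
import Mathlib
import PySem

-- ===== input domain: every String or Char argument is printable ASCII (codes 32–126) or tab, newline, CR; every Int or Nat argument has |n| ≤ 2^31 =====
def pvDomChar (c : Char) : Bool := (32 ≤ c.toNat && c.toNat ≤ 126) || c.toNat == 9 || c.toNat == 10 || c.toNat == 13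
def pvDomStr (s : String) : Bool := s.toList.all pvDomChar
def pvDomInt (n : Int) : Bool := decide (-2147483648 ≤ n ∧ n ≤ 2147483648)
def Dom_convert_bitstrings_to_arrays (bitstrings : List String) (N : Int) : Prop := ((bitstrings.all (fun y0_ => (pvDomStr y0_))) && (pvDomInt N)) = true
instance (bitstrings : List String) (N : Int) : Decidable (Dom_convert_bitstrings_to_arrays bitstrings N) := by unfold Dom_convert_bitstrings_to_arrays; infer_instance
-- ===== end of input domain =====

-- B replaces A's 2^N-entry outcome table and dict with a direct binary parse of each bitstring.

-- ===== PORT A =====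
-- hand port of format(i, '0' + str(N) + 'b') for i ≥ 0, width N ≥ 0 (exact there):
-- the binary digits of i, zero-padded on the left to max(width, bit_length(i), 1) characters,
-- i.e. the m top-down bits of i with m = that maximum (Python pads the minimal representation)
def pyBits (i : Nat) : Nat → List Char
  | 0 => []
  | m + 1 => (if i.testBit m then '1' else '0') :: pyBits i m
def pyFormatBin (i : Nat) (width : Nat) : String :=
  String.ofList (pyBits i (max (max 1 (PySem.Int.bitLength (i : Int))) width))

def convert_bitstrings_to_arrays (bitstrings : List String) (N : Int) : List (List Int) :=
  let all_possible_outcomes :=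
    (PySem.List.pyRange 0 (2 ^ N.toNat) 1).map (fun i => pyFormatBin i.toNat N.toNat)
  let outcome_to_index : PySem.Dict String Int :=
    (PySem.List.enumerate all_possible_outcomes 0).foldl
      (fun d p => d.insert p.2 p.1) PySem.Dict.empty
  bitstrings.foldl (fun results bitstring =>
    let result_array := List.replicate (2 ^ N.toNat) (0 : Int)
    results ++ [if outcome_to_index.contains bitstring then
        -- outcome_to_index[bitstring]: the key is present, and every stored index is ≥ 0
        result_array.set (outcome_to_index.getD bitstring 0).toNat 1
      else result_array]) []

-- ===== PORT B =====
-- int('0' + bs, 2) for bs already checked to be over {'0','1'}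
def cbta_binval (cs : List Char) : Int :=
  cs.foldl (fun a c => 2 * a + (if c = '1' then 1 else 0)) 0
def cbta_one_hot (size : Nat) (N : Int) (bs : String) : List Int :=
  let cs := bs.toList
  let row := List.replicate size (0 : Int)
  if (cs.length : Int) = N ∧ cs.all (fun c => c = '0' || c = '1') then
    row.set (cbta_binval ('0' :: cs)).toNat 1
  else row
def convert_bitstrings_to_arrays_alt (bitstrings : List String) (N : Int) : List (List Int) :=
  bitstrings.map (cbta_one_hot (2 ^ N.toNat) N)

-- ===== PRECONDITION & SPEC =====
-- Pre_ excludes N < 0, where Python A raises (TypeError: range(2**N) on a float), and N ≥ 64,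
-- where A never returns (it must materialize 2^N outcome strings and 2^N-element rows, beyond any
-- memory) and B raises OverflowError on the 2^N-element row
def Pre_convert_bitstrings_to_arrays (bitstrings : List String) (N : Int) : Prop := 0 ≤ N ∧ N < 64
instance (bitstrings : List String) (N : Int) : Decidable (Pre_convert_bitstrings_to_arrays bitstrings N) := by unfold Pre_convert_bitstrings_to_arrays; infer_instance
def pvWitness_convert_bitstrings_to_arrays : List String × Int := (["01", "10", "ab"], 2)

-- When N = 0, A's format-built outcome table holds the spurious string "0" instead of the true
-- length-0 outcome "", so A one-hots "0" and zeroes ""; B one-hots "" and zeroes "0", which is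
-- the intended indexing of the single outcome of 0 bits.
def D_convert_bitstrings_to_arrays (bitstrings : List String) (N : Int) : Prop :=
  N = 0 ∧ ("0" ∈ bitstrings ∨ "" ∈ bitstrings)
instance (bitstrings : List String) (N : Int) : Decidable (D_convert_bitstrings_to_arrays bitstrings N) := by unfold D_convert_bitstrings_to_arrays; infer_instance

def Spec_convert_bitstrings_to_arrays (bitstrings : List String) (N : Int) (out : List (List Int)) : Prop := ¬ D_convert_bitstrings_to_arrays bitstrings N → out = convert_bitstrings_to_arrays_alt bitstrings N
instance (bitstrings : List String) (N : Int) (out : List (List Int)) : Decidable (Spec_convert_bitstrings_to_arrays bitstrings N out) := by unfold Spec_convert_bitstrings_to_arrays; infer_instance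

def pvDiffWitness_convert_bitstrings_to_arrays : List String × Int := (["0", ""], 0)
def pvDiffWitnessOut_convert_bitstrings_to_arrays : (List (List Int)) × (List (List Int)) :=
  ([[1], [0]], [[0], [1]])

-- ===== CLAIM (what is proved, stated in full; the proofs are below) =====
def Claim_unchanged_convert_bitstrings_to_arrays : Prop := ∀ (bitstrings : List String) (N : Int), Dom_convert_bitstrings_to_arrays bitstrings N → Pre_convert_bitstrings_to_arrays bitstrings N → Spec_convert_bitstrings_to_arrays bitstrings N (convert_bitstrings_to_arrays bitstrings N)
def Claim_changed_convert_bitstrings_to_arrays : Prop := Dom_convert_bitstrings_to_arrays (pvDiffWitness_convert_bitstrings_to_arrays.1) (pvDiffWitness_convert_bitstrings_to_arrays.2) ∧ Pre_convert_bitstrings_to_arrays (pvDiffWitness_convert_bitstrings_to_arrays.1) (pvDiffWitness_convert_bitstrings_to_arrays.2) ∧ D_convert_bitstrings_to_arrays (pvDiffWitness_convert_bitstrings_to_arrays.1) (pvDiffWitness_convert_bitstrings_to_arrays.2) ∧ convert_bitstrings_to_arrays (pvDiffWitness_convert_bitstrings_to_arrays.1) (pvDiffWitness_convert_bitstrings_to_arrays.2)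 = pvDiffWitnessOut_convert_bitstrings_to_arrays.1 ∧ convert_bitstrings_to_arrays_alt (pvDiffWitness_convert_bitstrings_to_arrays.1) (pvDiffWitness_convert_bitstrings_to_arrays.2) = pvDiffWitnessOut_convert_bitstrings_to_arrays.2 ∧ pvDiffWitnessOut_convert_bitstrings_to_arrays.1 ≠ pvDiffWitnessOut_convert_bitstrings_to_arrays.2
def Claim_exact_convert_bitstrings_to_arrays : Prop := ∀ (bitstrings : List String) (N : Int), Dom_convert_bitstrings_to_arrays bitstrings N → Pre_convert_bitstrings_to_arrays bitstrings N → D_convert_bitstrings_to_arrays bitstrings N → convert_bitstrings_to_arrays bitstrings N ≠ convert_bitstrings_to_arrays_alt bitstrings N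

-- ===== LEMMAS AND PROOFS =====

-- Nat-valued binary value of a digit list
def cbtaBv (cs : List Char) : Nat :=
  cs.foldl (fun a c => 2 * a + (if c = '1' then 1 else 0)) 0

-- A's per-row function (the body of A's loop, with A's outcome dict rebuilt from N)
def cbtaRowA (N : Int) (bs : String) : List Int :=
  let all_possible_outcomes :=
    (PySem.List.pyRange 0 (2 ^ N.toNat) 1).map (fun i => pyFormatBin i.toNat N.toNat)
  let outcome_to_index : PySem.Dict String Int :=
    (PySem.List.enumerate all_possible_outcomes 0).foldl
      (fun d p => d.insert p.2 p.1) PySem.Dict.empty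
  let result_array := List.replicate (2 ^ N.toNat) (0 : Int)
  if outcome_to_index.contains bs then
    result_array.set (outcome_to_index.getD bs 0).toNat 1
  else result_array

theorem cbta_a_eq_map (bitstrings : List String) (N : Int) :
    convert_bitstrings_to_arrays bitstrings N = bitstrings.map (cbtaRowA N) := by
  unfold convert_bitstrings_to_arrays
  rw [PySem.List.foldl_append_singleton_eq_map]
  rfl

theorem cbta_bv_foldl (cs : List Char) (a : Nat) :
    cs.foldl (fun a c => 2 * a + (if c = '1' then 1 else 0)) a
      = a * 2 ^ cs.length + cbtaBv cs := by
  induction cs generalizing a with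
  | nil => simp [cbtaBv]
  | cons c cs ih =>
    simp only [List.foldl_cons, List.length_cons, cbtaBv] at *
    rw [ih, ih (2 * 0 + _)]
    split <;> ring

theorem cbta_binval_eq (cs : List Char) : cbta_binval cs = (cbtaBv cs : Int) := by
  suffices h : ∀ a : Nat, cs.foldl (fun a c => 2 * a + (if c = '1' then 1 else 0)) (a : Int)
      = ((cs.foldl (fun a c => 2 * a + (if c = '1' then 1 else 0)) a : Nat) : Int) by
    simpa [cbta_binval, cbtaBv] using h 0
  induction cs with
  | nil => simp
  | cons c cs ih =>
    intro a
    simp only [List.foldl_cons]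
    split <;> simpa using ih _

theorem cbta_bits_len (i m : Nat) : (pyBits i m).length = m := by
  induction m with
  | zero => rfl
  | succ m ih => simp [pyBits, ih]

theorem cbta_bits_binary (i m : Nat) : ∀ c ∈ pyBits i m, c = '0' ∨ c = '1' := by
  induction m with
  | zero => simp [pyBits]
  | succ m ih =>
    intro c hc
    rcases List.mem_cons.mp hc with h | h
    · subst h; split <;> simp
    · exact ih c h

theorem cbta_bv_lt (cs : List Char) : cbtaBv cs < 2 ^ cs.length := by
  induction cs with
  | nil => simp [cbtaBv]
  | cons c cs ih =>
    have hfold := cbta_bv_foldl cs (2 * 0 + (if c = '1' then 1 else 0))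
    simp only [cbtaBv, List.foldl_cons, List.length_cons] at *
    rw [hfold]
    have hd : (2 * 0 + (if c = '1' then 1 else 0)) * 2 ^ cs.length ≤ 2 ^ cs.length := by
      split <;> simp
    have hpow : 2 ^ (cs.length + 1) = 2 ^ cs.length + 2 ^ cs.length := by ring
    omega

theorem cbta_bv_cons (c : Char) (cs : List Char) :
    cbtaBv (c :: cs) = (if c = '1' then 1 else 0) * 2 ^ cs.length + cbtaBv cs := by
  simpa only [cbtaBv, List.foldl_cons, Nat.mul_zero, Nat.zero_add] using
    cbta_bv_foldl cs (2 * 0 + (if c = '1' then 1 else 0))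

theorem cbta_bits_mod (m : Nat) : ∀ i, pyBits i m = pyBits (i % 2 ^ m) m := by
  induction m with
  | zero => intro i; rfl
  | succ m ih =>
    intro i
    have h1 : (i % 2 ^ (m + 1)).testBit m = i.testBit m := by
      rw [Nat.testBit_mod_two_pow]; simp
    have h2 : pyBits (i % 2 ^ (m + 1)) m = pyBits i m := by
      rw [ih (i % 2 ^ (m + 1)), Nat.mod_mod_of_dvd _ (pow_dvd_pow 2 (by omega)), ← ih]
    simp [pyBits, h1, h2]

theorem cbta_bv_bits (i m : Nat) : cbtaBv (pyBits i m) = i % 2 ^ m := by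
  induction m with
  | zero => simp [pyBits, cbtaBv, Nat.mod_one]
  | succ m ih =>
    rw [show pyBits i (m + 1) = (if i.testBit m then '1' else '0') :: pyBits i m from rfl,
      cbta_bv_cons, cbta_bits_len, ih]
    have ht : i.testBit m = decide (i / 2 ^ m % 2 = 1) := Nat.testBit_eq_decide_div_mod_eq
    have hmm : i % (2 ^ m * 2) = i % 2 ^ m + 2 ^ m * (i / 2 ^ m % 2) := Nat.mod_mul ..
    have hpow : (2 : Nat) ^ (m + 1) = 2 ^ m * 2 := by ring
    by_cases hb : i / 2 ^ m % 2 = 1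
    · simp only [ht, hb, hpow, hmm]; simp; omega
    · have hb0 : i / 2 ^ m % 2 = 0 := by omega
      simp only [ht, hpow, hmm, hb0]; simp

theorem cbta_bits_bv (cs : List Char) (hbin : ∀ c ∈ cs, c = '0' ∨ c = '1') :
    pyBits (cbtaBv cs) cs.length = cs := by
  induction cs with
  | nil => rfl
  | cons c cs ih =>
    have hd : cbtaBv (c :: cs) = 2 ^ cs.length * (if c = '1' then 1 else 0) + cbtaBv cs := by
      rw [cbta_bv_cons]; ring
    have hlt := cbta_bv_lt cs
    have hdiv : cbtaBv (c :: cs) / 2 ^ cs.length = (if c = '1' then 1 else 0) := by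
      rw [hd, Nat.mul_add_div (by positivity), Nat.div_eq_of_lt hlt, Nat.add_zero]
    have hmod : cbtaBv (c :: cs) % 2 ^ cs.length = cbtaBv cs := by
      rw [hd, Nat.mul_add_mod, Nat.mod_eq_of_lt hlt]
    have htop : (cbtaBv (c :: cs)).testBit cs.length = (c == '1') := by
      rw [Nat.testBit_eq_decide_div_mod_eq, hdiv]
      rcases hbin c List.mem_cons_self with h | h <;> subst h <;> decide
    rw [show (c :: cs).length = cs.length + 1 from rfl,
      show pyBits (cbtaBv (c :: cs)) (cs.length + 1)
        = (if (cbtaBv (c :: cs)).testBit cs.length then '1' else '0')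
          :: pyBits (cbtaBv (c :: cs)) cs.length from rfl,
      htop, cbta_bits_mod, hmod, ih (fun c hc => hbin c (List.mem_cons_of_mem _ hc))]
    rcases hbin c List.mem_cons_self with h | h <;> subst h <;> simp

-- the outcome table and dict A builds, as functions of n = N.toNat
def cbtaOuts (n : Nat) : List String :=
  (PySem.List.pyRange 0 (2 ^ n) 1).map (fun i => pyFormatBin i.toNat n)
def cbtaDict (n : Nat) : PySem.Dict String Int :=
  (PySem.List.enumerate (cbtaOuts n) 0).foldl (fun d p => d.insert p.2 p.1) PySem.Dict.empty

theorem cbta_fmt_eq (i n : Nat) (hi : i < 2 ^ n) (hn : 1 ≤ n) :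
    pyFormatBin i n = String.ofList (pyBits i n) := by
  unfold pyFormatBin
  congr 1
  have hbl : PySem.Int.bitLength (i : Int) ≤ n := by
    rcases Nat.eq_zero_or_pos i with h0 | hpos
    · subst h0
      rw [show ((0 : Nat) : Int) = 0 from rfl, PySem.Int.bitLength_zero]
      omega
    · by_contra hgt
      have hne : (i : Int) ≠ 0 := by exact_mod_cast Nat.pos_iff_ne_zero.mp hpos
      have h1 := PySem.Int.two_pow_bitLength_le (i : Int) hne
      rw [Int.natAbs_natCast] at h1
      have h2 : 2 ^ n ≤ 2 ^ (PySem.Int.bitLength (i : Int) - 1) :=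
        Nat.pow_le_pow_right (by omega) (by omega)
      omega
  have hM : max (max 1 (PySem.Int.bitLength (i : Int))) n = n := by omega
  rw [hM]

theorem cbta_outs_len (n : Nat) : (cbtaOuts n).length = 2 ^ n := by
  unfold cbtaOuts
  rw [List.length_map, PySem.List.length_pyRange_one]
  have h2 : ((2 : Int) ^ n) = ((2 ^ n : Nat) : Int) := by push_cast; ring
  rw [Int.sub_zero, h2, Int.toNat_natCast]

theorem cbta_outs_getElem (n k : Nat) (h : k < (cbtaOuts n).length) :
    (cbtaOuts n)[k] = pyFormatBin k n := by
  unfold cbtaOuts at *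
  rw [List.getElem_map, PySem.List.getElem_pyRange_one]
  norm_num

theorem cbta_outs_nodup (n : Nat) (hn : 1 ≤ n) : (cbtaOuts n).Nodup := by
  apply (PySem.List.nodup_pyRange_one 0 (2 ^ n)).map_on
  intro x hx y hy hfxy
  rw [PySem.List.mem_pyRange_one] at hx hy
  have hx2 : x.toNat < 2 ^ n := by
    have : ((2 : Int) ^ n) = ((2 ^ n : Nat) : Int) := by push_cast; ring
    omega
  have hy2 : y.toNat < 2 ^ n := by
    have : ((2 : Int) ^ n) = ((2 ^ n : Nat) : Int) := by push_cast; ring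
    omega
  rw [cbta_fmt_eq _ _ hx2 hn, cbta_fmt_eq _ _ hy2 hn] at hfxy
  have hb := congrArg (fun s => cbtaBv s.toList) hfxy
  simp only [String.toList_ofList, cbta_bv_bits] at hb
  rw [Nat.mod_eq_of_lt hx2, Nat.mod_eq_of_lt hy2] at hb
  omega

theorem cbta_dict_items (n : Nat) (hnd : (cbtaOuts n).Nodup) :
    (cbtaDict n).items = (PySem.List.enumerate (cbtaOuts n) 0).map (fun p => (p.2, p.1)) := by
  unfold cbtaDict
  rw [PySem.Dict.items_foldl_insert_fresh (PySem.List.enumerate (cbtaOuts n) 0)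
    (fun p => p.2) (fun p => p.1) PySem.Dict.empty
    (fun a _ => PySem.Dict.contains_empty _)
    (by rw [PySem.List.map_snd_enumerate]; exact hnd)]
  rfl

theorem cbta_dict_keys (n : Nat) (hnd : (cbtaOuts n).Nodup) :
    (cbtaDict n).keys = cbtaOuts n := by
  have h := congrArg (List.map (fun p : String × Int => p.1)) (cbta_dict_items n hnd)
  simp only [List.map_map] at h
  rw [show (cbtaDict n).keys = (cbtaDict n).items.map (fun p => p.1) from rfl, h]
  exact PySem.List.map_snd_enumerate (cbtaOuts n) 0

theorem cbta_dict_getD (n k : Nat) (hnd : (cbtaOuts n).Nodup) (hk : k < (cbtaOuts n).length) :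
    (cbtaDict n).getD (cbtaOuts n)[k] 0 = (k : Int) := by
  apply PySem.Dict.getD_of_mem_items
  · rw [cbta_dict_items n hnd]
    apply List.mem_map.mpr
    refine ⟨((k : Int), (cbtaOuts n)[k]), ?_, rfl⟩
    rw [PySem.List.mem_enumerate_iff]
    exact ⟨k, hk, by simp⟩
  · rw [cbta_dict_keys n hnd]; exact hnd

theorem cbta_dict_contains_iff (n : Nat) (hnd : (cbtaOuts n).Nodup) (bs : String) :
    (cbtaDict n).contains bs = true ↔ bs ∈ cbtaOuts n := by
  rw [PySem.Dict.contains_iff_mem_keys, cbta_dict_keys n hnd]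

theorem cbta_mem_outs_iff (n : Nat) (hn : 1 ≤ n) (bs : String) :
    bs ∈ cbtaOuts n ↔ (bs.toList.length = n ∧ ∀ c ∈ bs.toList, c = '0' ∨ c = '1') := by
  constructor
  · intro hmem
    obtain ⟨k, hk, hbs⟩ := List.mem_iff_getElem.mp hmem
    rw [cbta_outs_getElem n k hk] at hbs
    have hk2 : k < 2 ^ n := by rw [cbta_outs_len] at hk; exact hk
    rw [cbta_fmt_eq _ _ hk2 hn] at hbs
    subst hbs
    rw [String.toList_ofList]
    exact ⟨cbta_bits_len k n, cbta_bits_binary k n⟩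
  · rintro ⟨hlen, hbin⟩
    have hlt : cbtaBv bs.toList < 2 ^ n := hlen ▸ cbta_bv_lt bs.toList
    have hk : cbtaBv bs.toList < (cbtaOuts n).length := by rw [cbta_outs_len]; exact hlt
    have : (cbtaOuts n)[cbtaBv bs.toList] = bs := by
      rw [cbta_outs_getElem n _ hk, cbta_fmt_eq _ _ hlt hn, ← hlen, cbta_bits_bv bs.toList hbin]
      exact String.ofList_toList
    rw [← this]
    exact List.getElem_mem hk

theorem cbta_row_eq (N : Int) (bs : String) (hN : 0 ≤ N)
    (h : 1 ≤ N.toNat ∨ (bs ≠ "0" ∧ bs ≠ "")) :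
    cbtaRowA N bs = cbta_one_hot (2 ^ N.toNat) N bs := by
  have hA : cbtaRowA N bs = (if (cbtaDict N.toNat).contains bs then
      (List.replicate (2 ^ N.toNat) (0 : Int)).set ((cbtaDict N.toNat).getD bs 0).toNat 1
    else List.replicate (2 ^ N.toNat) (0 : Int)) := rfl
  have hB : cbta_one_hot (2 ^ N.toNat) N bs = (if ((bs.toList.length : Int) = N ∧
        bs.toList.all (fun c => c = '0' || c = '1')) then
      (List.replicate (2 ^ N.toNat) (0 : Int)).set (cbta_binval ('0' :: bs.toList)).toNat 1
    else List.replicate (2 ^ N.toNat) (0 : Int)) := rfl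
  rw [hA, hB]
  by_cases h1 : 1 ≤ N.toNat
  · have hnd := cbta_outs_nodup N.toNat h1
    by_cases hval : bs.toList.length = N.toNat ∧ ∀ c ∈ bs.toList, c = '0' ∨ c = '1'
    · -- bs is a valid outcome: both sides one-hot at its binary value
      have hmem : bs ∈ cbtaOuts N.toNat := (cbta_mem_outs_iff N.toNat h1 bs).mpr hval
      have hlt : cbtaBv bs.toList < 2 ^ N.toNat := hval.1 ▸ cbta_bv_lt bs.toList
      have hk : cbtaBv bs.toList < (cbtaOuts N.toNat).length := by
        rw [cbta_outs_len]; exact hlt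
      have houts : (cbtaOuts N.toNat)[cbtaBv bs.toList] = bs := by
        rw [cbta_outs_getElem N.toNat _ hk, cbta_fmt_eq _ _ hlt h1, ← hval.1,
          cbta_bits_bv bs.toList hval.2]
        exact String.ofList_toList
      have hcont : (cbtaDict N.toNat).contains bs = true :=
        (cbta_dict_contains_iff N.toNat hnd bs).mpr hmem
      have hgetD : (cbtaDict N.toNat).getD bs 0 = (cbtaBv bs.toList : Int) := by
        have hg := cbta_dict_getD N.toNat _ hnd hk
        rw [houts] at hg
        exact hg
      have hcondB : ((bs.toList.length : Int) = N ∧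
          bs.toList.all (fun c => c = '0' || c = '1')) := by
        refine ⟨by omega, List.all_eq_true.mpr ?_⟩
        intro c hc
        rcases hval.2 c hc with h | h <;> simp [h]
      rw [if_pos hcont, if_pos hcondB, hgetD]
      have hbv0 : cbta_binval ('0' :: bs.toList) = (cbtaBv bs.toList : Int) := by
        rw [cbta_binval_eq, cbta_bv_cons]
        norm_num
      rw [hbv0]
    · -- bs is not a valid outcome: both sides are the zero row
      have hcont : ¬ (cbtaDict N.toNat).contains bs = true := fun hc =>
        hval ((cbta_mem_outs_iff N.toNat h1 bs).mp
          ((cbta_dict_contains_iff N.toNat hnd bs).mp hc))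
      have hcondB : ¬ ((bs.toList.length : Int) = N ∧
          bs.toList.all (fun c => c = '0' || c = '1')) := by
        rintro ⟨hl, ha⟩
        refine hval ⟨by omega, ?_⟩
        intro c hc
        have := List.all_eq_true.mp ha c hc
        simpa using this
      rw [if_neg hcont, if_neg hcondB]
  · -- N = 0: A's lone outcome is "0", B's is ""; both excluded here, so both rows are zero
    have hN0 : N = 0 := by omega
    subst hN0
    simp only [Int.toNat_zero] at h1 ⊢
    rcases h with h | ⟨hb0, hbe⟩
    · omega
    · have hd0 : cbtaDict 0 = PySem.Dict.mk [("0", (0 : Int))] := rfl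
      have hcont : ¬ (cbtaDict 0).contains bs = true := by
        rw [hd0, PySem.Dict.contains_mk]
        simp only [List.any_cons, List.any_nil, Bool.or_false]
        intro hc
        exact hb0 ((beq_iff_eq).mp hc).symm
      have hcondB : ¬ ((bs.toList.length : Int) = (0 : Int) ∧
          bs.toList.all (fun c => c = '0' || c = '1')) := by
        rintro ⟨hl, -⟩
        have : bs.toList = [] := List.length_eq_zero_iff.mp (by omega)
        refine hbe ?_
        rw [← String.ofList_toList (s := bs), this]
      rw [if_neg hcont, if_neg hcondB]

-- ===== VERDICT (by name: the statement is the Claim_ definition above) =====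
theorem convert_bitstrings_to_arrays_spec : Claim_unchanged_convert_bitstrings_to_arrays := by
  intro bitstrings N _ hPre hD
  obtain ⟨hN, -⟩ := hPre
  rw [cbta_a_eq_map]
  unfold convert_bitstrings_to_arrays_alt
  rw [List.map_inj_left]
  intro bs hbs
  apply cbta_row_eq _ _ hN
  unfold D_convert_bitstrings_to_arrays at hD
  rcases Nat.eq_zero_or_pos N.toNat with h0 | h1
  · right
    have hN0 : N = 0 := by omega
    subst hN0
    constructor <;> rintro rfl <;> exact hD ⟨rfl, by simp [hbs]⟩
  · exact Or.inl h1

theorem convert_bitstrings_to_arrays_changed : Claim_changed_convert_bitstrings_to_arrays := by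
  unfold Claim_changed_convert_bitstrings_to_arrays; decide

theorem convert_bitstrings_to_arrays_tight : Claim_exact_convert_bitstrings_to_arrays := by
  intro bitstrings N _ hPre hD heq
  obtain ⟨hN0, hmem⟩ := hD
  subst hN0
  rw [cbta_a_eq_map] at heq
  unfold convert_bitstrings_to_arrays_alt at heq
  rw [List.map_inj_left] at heq
  rcases hmem with hm | hm
  · have := heq _ hm
    revert this; decide
  · have := heq _ hm
    revert this; decide
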